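-- pv_equiv track=rewrite | github.com/That-Cool-Coder/discordbots | bruh_bot.py | is_bruh
-- ===== SOURCE A (Python) =====
-- def is_bruh(message: str) -> bool:
--     '''Return whether message is a variant of the word 'bruh'
--     todo: handle possible backward bruhs
--     '''
--
--     message = message.lower()
--
--     # remove punctuation, spaces, etc
--     message = ''.join(c for c in message if c.isalnum())
--
--     # Check that message contains nothing except chars in bruh
--     invalid_chars_present = True in [ch not in 'bruh' for ch in message]
--     if invalid_chars_present:
--         return False
--
--     # Check that the message contains the required characters for a bruh
--     # only b and r are required - 'br' is considered to be a valid bruh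
--     if ('b' not in message) or ('r' not in message):
--         return False
--
--     # For each char, check that it should go after the previous one
--     is_bruh = True
--     for char_idx in range(1, len(message)):
--         prev_char = message[char_idx - 1]
--         crnt_char = message[char_idx]
--         if 'bruh'.index(prev_char) > 'bruh'.index(crnt_char):
--             is_bruh = False
--             break
--
--     return is_bruh
-- ===== SOURCE B (Python) =====
-- def _drop(s, ch):
--     """Remove the leading run of ch from s."""
--     i = 0
--     while i < len(s) and s[i] == ch:
--         i += 1
--     return s[i:]
--
--
-- def is_bruh(message: str) -> bool:
--     '''Return whether message is a variant of the word 'bruh'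
--     (matches the pattern b+ r+ u* h* after cleaning).'''
--     s = ''.join(c for c in message.lower() if c.isalnum())
--     t = _drop(s, 'b')          # at least one leading 'b' required
--     u = _drop(t, 'r')          # at least one 'r' required
--     rest = _drop(_drop(u, 'u'), 'h')
--     return len(t) < len(s) and len(u) < len(t) and rest == ''
-- ===== Notes on version B (the rewrite author's own statement) =====
-- stated objective: simpler
-- what changed: B replaces A's three separate passes (membership check of every char in 'bruh', presence checks for 'b' and 'r', and an index-based adjacent-order scan using 'bruh'.index) by directly consuming the cleaned string as runs b+ r+ u* h*: drop the leading b-run, r-run, u-run, h-run and require the b- and r-runs nonempty and nothing left.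
import Mathlib
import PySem

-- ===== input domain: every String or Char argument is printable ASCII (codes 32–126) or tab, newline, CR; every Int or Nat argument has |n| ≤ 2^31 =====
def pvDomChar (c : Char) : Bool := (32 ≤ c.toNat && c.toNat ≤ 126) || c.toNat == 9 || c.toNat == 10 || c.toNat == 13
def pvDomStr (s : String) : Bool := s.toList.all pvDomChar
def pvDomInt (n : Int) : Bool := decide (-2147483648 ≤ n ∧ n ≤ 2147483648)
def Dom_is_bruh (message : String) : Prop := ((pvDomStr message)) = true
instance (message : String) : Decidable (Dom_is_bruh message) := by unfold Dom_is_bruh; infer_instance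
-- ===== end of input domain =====

-- B consumes the cleaned message as runs b+ r+ u* h* instead of A's membership + presence + index-order scan; objective: simpler.

-- ===== PORT A =====
-- 'bruh'.index(c) is PySem.Chars.find ['b','r','u','h'] [c]; Python's str.index would raise where
-- find returns -1, but A's loop only runs after every char was checked to be in 'bruh', so it is exact here.
def isBruhIdx (c : Char) : Int := PySem.Chars.find ['b', 'r', 'u', 'h'] [c]

-- the 'for char_idx in range(1, len(message))' loop with its break
def isBruhLoopA (s : List Char) (i : Nat) : Bool :=
  if _h : i < s.length then
    let prev := s.getD (i - 1) ' '
    let crnt := s.getD i ' '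
    if isBruhIdx prev > isBruhIdx crnt then false
    else isBruhLoopA s (i + 1)
  else true
termination_by s.length - i

def is_bruh (message : String) : Bool :=
  let lowered := PySem.Str.lower message
  -- ''.join(c for c in message if c.isalnum()), kept as a List Char
  let cleaned : List Char := lowered.toList.filter (fun c => PySem.Chars.isalnum c)
  -- invalid_chars_present = True in [ch not in 'bruh' for ch in message]
  let flags := cleaned.map (fun ch => !(PySem.Chars.isIn [ch] ['b', 'r', 'u', 'h']))
  if flags.contains true then false
  else if !(PySem.Chars.isIn ['b'] cleaned) || !(PySem.Chars.isIn ['r'] cleaned) then false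
  else isBruhLoopA cleaned 1

-- ===== PORT B =====
-- _drop(s, ch): the while loop removing the leading run of ch is List.dropWhile (· == ch)
def isBruhDrop (s : List Char) (ch : Char) : List Char := s.dropWhile (· == ch)

def is_bruh_alt (message : String) : Bool :=
  let s : List Char := (PySem.Str.lower message).toList.filter (fun c => PySem.Chars.isalnum c)
  let t := isBruhDrop s 'b'
  let u := isBruhDrop t 'r'
  let rest := isBruhDrop (isBruhDrop u 'u') 'h'
  decide (t.length < s.length) && decide (u.length < t.length) && decide (rest = [])

-- ===== PRECONDITION & SPEC =====
def Spec_is_bruh (message : String) (out : Bool) : Prop := out = is_bruh_alt message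
instance (message : String) (out : Bool) : Decidable (Spec_is_bruh message out) := by unfold Spec_is_bruh; infer_instance

-- ===== CLAIM (what is proved, stated in full; the proofs are below) =====
def Claim_equal_is_bruh : Prop := ∀ (message : String), Dom_is_bruh message → Spec_is_bruh message (is_bruh message)

-- ===== LEMMAS AND PROOFS =====

-- canonical shape of a bruh: b+ r+ u* h*
def BruhShape (l : List Char) : Prop :=
  ∃ nb nr nu nh : Nat, 1 ≤ nb ∧ 1 ≤ nr ∧
    l = List.replicate nb 'b' ++ (List.replicate nr 'r' ++ (List.replicate nu 'u' ++ List.replicate nh 'h'))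

-- the bodies of the two ports after cleaning, as functions of the cleaned char list
def Acore (l : List Char) : Bool :=
  if (l.map (fun ch => !(PySem.Chars.isIn [ch] ['b', 'r', 'u', 'h']))).contains true then false
  else if !(PySem.Chars.isIn ['b'] l) || !(PySem.Chars.isIn ['r'] l) then false
  else isBruhLoopA l 1

def Bcore (l : List Char) : Bool :=
  decide ((isBruhDrop l 'b').length < l.length) &&
  decide ((isBruhDrop (isBruhDrop l 'b') 'r').length < (isBruhDrop l 'b').length) &&
  decide (isBruhDrop (isBruhDrop (isBruhDrop (isBruhDrop l 'b') 'r') 'u') 'h' = [])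

theorem is_bruh_eq_Acore (m : String) :
    is_bruh m = Acore ((PySem.Str.lower m).toList.filter (fun c => PySem.Chars.isalnum c)) := rfl

theorem is_bruh_alt_eq_Bcore (m : String) :
    is_bruh_alt m = Bcore ((PySem.Str.lower m).toList.filter (fun c => PySem.Chars.isalnum c)) := rfl

theorem isIn_singleton_iff (c : Char) (l : List Char) :
    PySem.Chars.isIn [c] l = true ↔ c ∈ l := by
  rw [PySem.Chars.isIn_iff_infix]
  constructor
  · intro h; exact h.mem (by simp)
  · intro h
    obtain ⟨p, q, rfl⟩ := List.append_of_mem h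
    exact ⟨p, q, by simp⟩

theorem loopA_shift (c : Char) (s : List Char) (i : Nat) (hi : 1 ≤ i) :
    isBruhLoopA (c :: s) (i + 1) = isBruhLoopA s i := by
  obtain ⟨k, rfl⟩ : ∃ k, i = k + 1 := ⟨i - 1, by omega⟩
  clear hi
  conv_lhs => rw [isBruhLoopA]
  conv_rhs => rw [isBruhLoopA]
  by_cases h : k + 1 < s.length
  · rw [dif_pos (by simp; omega), dif_pos h]
    simp only [Nat.add_sub_cancel, List.getD_cons_succ]
    split
    · rfl
    · exact loopA_shift c s (k + 2) (by omega)
  · rw [dif_neg (by simp; omega), dif_neg h]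
termination_by s.length - i

theorem loopA_eq_chain (l : List Char) :
    isBruhLoopA l 1 = decide (List.IsChain (fun a b => isBruhIdx a ≤ isBruhIdx b) l) := by
  induction l with
  | nil => rw [isBruhLoopA]; simp
  | cons a t ih =>
    cases t with
    | nil => rw [isBruhLoopA]; simp
    | cons b t' =>
      conv_lhs => rw [isBruhLoopA]
      rw [dif_pos (by simp)]
      simp only [List.getD_cons_succ, List.getD_cons_zero, Nat.sub_self]
      rw [loopA_shift a (b :: t') 1 le_rfl, ih]
      by_cases hab : isBruhIdx a > isBruhIdx b
      · simp [hab, List.isChain_cons_cons, not_le.mpr hab]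
      · simp [hab, List.isChain_cons_cons, not_lt.mp hab]

theorem sorted_decomp (l : List Char)
    (hall : ∀ c ∈ l, c ∈ (['b', 'r', 'u', 'h'] : List Char))
    (hch : List.IsChain (fun a b => isBruhIdx a ≤ isBruhIdx b) l) :
    ∃ nb nr nu nh : Nat,
      l = List.replicate nb 'b' ++ (List.replicate nr 'r' ++ (List.replicate nu 'u' ++ List.replicate nh 'h')) := by
  induction l with
  | nil => exact ⟨0, 0, 0, 0, rfl⟩
  | cons c t ih =>
    obtain ⟨nb, nr, nu, nh, rfl⟩ :=
      ih (fun x hx => hall x (List.mem_cons_of_mem c hx)) hch.of_cons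
    have hc := hall c (List.mem_cons_self)
    simp only [List.mem_cons, List.not_mem_nil, or_false] at hc
    rcases hc with rfl | rfl | rfl | rfl
    · exact ⟨nb + 1, nr, nu, nh, by simp [List.replicate_succ]⟩
    · -- c = 'r': the list cannot have started a b-run
      cases nb with
      | succ m =>
        exfalso
        simp only [List.replicate_succ, List.cons_append, List.isChain_cons_cons] at hch
        exact absurd hch.1 (by decide)
      | zero => exact ⟨0, nr + 1, nu, nh, by simp [List.replicate_succ]⟩
    · -- c = 'u': nb = nr = 0
      cases nb with
      | succ m =>
        exfalso
        simp only [List.replicate_succ, List.cons_append, List.isChain_cons_cons] at hch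
        exact absurd hch.1 (by decide)
      | zero =>
        cases nr with
        | succ m =>
          exfalso
          simp only [List.replicate_zero, List.nil_append, List.replicate_succ,
            List.cons_append, List.isChain_cons_cons] at hch
          exact absurd hch.1 (by decide)
        | zero => exact ⟨0, 0, nu + 1, nh, by simp [List.replicate_succ]⟩
    · -- c = 'h': nb = nr = nu = 0
      cases nb with
      | succ m =>
        exfalso
        simp only [List.replicate_succ, List.cons_append, List.isChain_cons_cons] at hch
        exact absurd hch.1 (by decide)
      | zero =>
        cases nr with
        | succ m =>
          exfalso
          simp only [List.replicate_zero, List.nil_append, List.replicate_succ,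
            List.cons_append, List.isChain_cons_cons] at hch
          exact absurd hch.1 (by decide)
        | zero =>
          cases nu with
          | succ m =>
            exfalso
            simp only [List.replicate_zero, List.nil_append, List.replicate_succ,
              List.cons_append, List.isChain_cons_cons] at hch
            exact absurd hch.1 (by decide)
          | zero => exact ⟨0, 0, 0, nh + 1, by simp [List.replicate_succ]⟩

theorem A_shape (l : List Char)
    (hall : ∀ c ∈ l, c ∈ (['b', 'r', 'u', 'h'] : List Char))
    (hb : 'b' ∈ l) (hr : 'r' ∈ l)
    (hch : List.IsChain (fun a b => isBruhIdx a ≤ isBruhIdx b) l) : BruhShape l := by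
  obtain ⟨nb, nr, nu, nh, rfl⟩ := sorted_decomp l hall hch
  refine ⟨nb, nr, nu, nh, ?_, ?_, rfl⟩
  · simp only [List.mem_append, List.mem_replicate] at hb
    rcases hb with ⟨h, _⟩ | ⟨_, h⟩ | ⟨_, h⟩ | ⟨_, h⟩ <;> first | omega | simp at h
  · simp only [List.mem_append, List.mem_replicate] at hr
    rcases hr with ⟨_, h⟩ | ⟨h, _⟩ | ⟨_, h⟩ | ⟨_, h⟩ <;> first | omega | simp at h

theorem isChain_replicate_append (R : Char → Char → Prop) (c : Char) (hcc : R c c)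
    (n : Nat) (xs : List Char) (hxs : List.IsChain R xs)
    (hhead : ∀ x ∈ xs.head?, R c x) : List.IsChain R (List.replicate n c ++ xs) := by
  induction n with
  | zero => simpa
  | succ m ih =>
    rw [List.replicate_succ, List.cons_append, List.isChain_cons]
    refine ⟨?_, ih⟩
    intro x hx
    cases m with
    | zero => exact hhead x (by simpa using hx)
    | succ k =>
      rw [List.replicate_succ, List.cons_append] at hx
      simp only [List.head?_cons, Option.mem_some_iff] at hx
      subst hx; exact hcc

theorem shape_A (l : List Char) (h : BruhShape l) :
    (∀ c ∈ l, c ∈ (['b', 'r', 'u', 'h'] : List Char)) ∧ 'b' ∈ l ∧ 'r' ∈ l ∧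
      List.IsChain (fun a b => isBruhIdx a ≤ isBruhIdx b) l := by
  obtain ⟨nb, nr, nu, nh, hnb, hnr, rfl⟩ := h
  refine ⟨?_, ?_, ?_, ?_⟩
  · intro c hc
    simp only [List.mem_append, List.mem_replicate] at hc
    rcases hc with ⟨_, rfl⟩ | ⟨_, rfl⟩ | ⟨_, rfl⟩ | ⟨_, rfl⟩ <;> simp
  · simp only [List.mem_append, List.mem_replicate]
    simp; omega
  · simp only [List.mem_append, List.mem_replicate]
    simp; omega
  · apply isChain_replicate_append _ _ (by decide) _ _ ?_ ?_
    · apply isChain_replicate_append _ _ (by decide) _ _ ?_ ?_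
      · apply isChain_replicate_append _ _ (by decide) _ _ ?_ ?_
        · have := isChain_replicate_append (fun a b => isBruhIdx a ≤ isBruhIdx b) 'h'
            (by decide) nh [] List.isChain_nil (by simp)
          simpa using this
        · intro x hx
          have := List.mem_of_mem_head? hx
          simp only [List.mem_replicate] at this
          rcases this with ⟨_, rfl⟩; decide
      · intro x hx
        have := List.mem_of_mem_head? hx
        simp only [List.mem_append, List.mem_replicate] at this
        rcases this with ⟨_, rfl⟩ | ⟨_, rfl⟩ <;> decide
    · intro x hx
      have := List.mem_of_mem_head? hx
      simp only [List.mem_append, List.mem_replicate] at this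
      rcases this with ⟨_, rfl⟩ | ⟨_, rfl⟩ | ⟨_, rfl⟩ <;> decide

theorem Acore_iff (l : List Char) : Acore l = true ↔ BruhShape l := by
  unfold Acore
  constructor
  · intro h
    split_ifs at h with h1 h2
    have hall : ∀ c ∈ l, c ∈ (['b', 'r', 'u', 'h'] : List Char) := by
      intro c hc
      by_contra hcn
      apply h1
      simp only [List.contains_eq_mem, List.mem_map, decide_eq_true_eq]
      exact ⟨c, hc, by simp [(not_iff_not.mpr (isIn_singleton_iff c _)).mpr hcn]⟩
    rw [Bool.or_eq_true, not_or] at h2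
    obtain ⟨hb, hr⟩ := h2
    simp only [Bool.not_eq_true', Bool.not_eq_false] at hb hr
    rw [loopA_eq_chain, decide_eq_true_eq] at h
    exact A_shape l hall ((isIn_singleton_iff _ _).mp hb) ((isIn_singleton_iff _ _).mp hr) h
  · intro hs
    obtain ⟨hall, hb, hr, hch⟩ := shape_A l hs
    have hc1 : (l.map (fun ch => !(PySem.Chars.isIn [ch] ['b', 'r', 'u', 'h']))).contains true = false := by
      simp only [List.contains_eq_mem, List.mem_map, decide_eq_false_iff_not, not_exists]
      rintro x ⟨hx, hbad⟩
      have := (isIn_singleton_iff x (['b', 'r', 'u', 'h'] : List Char)).mpr (hall x hx)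
      simp [this] at hbad
    rw [if_neg (by simp only [hc1]; simp), if_neg]
    · rw [loopA_eq_chain]; exact decide_eq_true hch
    · rw [Bool.or_eq_true, not_or]
      constructor <;> simp [isIn_singleton_iff, hb, hr]

theorem dropWhile_replicate_append (p : Char → Bool) (c : Char) (hpc : p c = true)
    (n : Nat) (xs : List Char) :
    List.dropWhile p (List.replicate n c ++ xs) = List.dropWhile p xs := by
  induction n with
  | zero => simp
  | succ n ih => simp [List.replicate_succ, hpc, ih]

theorem dropWhile_eq_self_of (p : Char → Bool) (l : List Char)
    (h : ∀ x ∈ l, p x = false) : l.dropWhile p = l := by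
  cases l with
  | nil => rfl
  | cons a t => rw [List.dropWhile_cons, h a (by simp)]; simp

theorem takeWhile_eq_replicate (c : Char) (l : List Char) :
    l.takeWhile (· == c) = List.replicate (l.takeWhile (· == c)).length c := by
  apply List.eq_replicate_of_mem
  intro x hx
  simpa using List.mem_takeWhile_imp hx

theorem B_shape (l : List Char) (h : Bcore l = true) : BruhShape l := by
  unfold Bcore at h
  simp only [Bool.and_eq_true, decide_eq_true_eq] at h
  obtain ⟨⟨h1, h2⟩, h3⟩ := h
  set t := isBruhDrop l 'b' with htdef
  set u := isBruhDrop t 'r' with hudef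
  set du := isBruhDrop u 'u' with hdudef
  have hl : List.replicate (l.takeWhile (· == 'b')).length 'b' ++ t = l := by
    rw [← takeWhile_eq_replicate]; exact List.takeWhile_append_dropWhile
  have ht : List.replicate (t.takeWhile (· == 'r')).length 'r' ++ u = t := by
    rw [← takeWhile_eq_replicate]; exact List.takeWhile_append_dropWhile
  have hu : List.replicate (u.takeWhile (· == 'u')).length 'u' ++ du = u := by
    rw [← takeWhile_eq_replicate]; exact List.takeWhile_append_dropWhile
  have hdu : du = List.replicate (du.takeWhile (· == 'h')).length 'h' := by
    have h3' : List.dropWhile (fun x => x == 'h') du = [] := h3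
    conv_lhs => rw [← List.takeWhile_append_dropWhile (p := (· == 'h')) (l := du)]
    rw [h3', List.append_nil]
    exact takeWhile_eq_replicate _ _
  refine ⟨(l.takeWhile (· == 'b')).length, (t.takeWhile (· == 'r')).length,
    (u.takeWhile (· == 'u')).length, (du.takeWhile (· == 'h')).length, ?_, ?_, ?_⟩
  · have := congrArg List.length hl
    simp only [List.length_append, List.length_replicate] at this
    omega
  · have := congrArg List.length ht
    simp only [List.length_append, List.length_replicate] at this
    omega
  · conv_lhs => rw [← hl, ← ht, ← hu, hdu]

theorem shape_B (l : List Char) (h : BruhShape l) : Bcore l = true := by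
  obtain ⟨nb, nr, nu, nh, hnb, hnr, rfl⟩ := h
  have ht : isBruhDrop (List.replicate nb 'b' ++ (List.replicate nr 'r' ++ (List.replicate nu 'u' ++ List.replicate nh 'h'))) 'b'
      = List.replicate nr 'r' ++ (List.replicate nu 'u' ++ List.replicate nh 'h') := by
    unfold isBruhDrop
    rw [dropWhile_replicate_append _ _ (by simp)]
    apply dropWhile_eq_self_of
    intro x hx
    simp only [List.mem_append, List.mem_replicate] at hx
    rcases hx with ⟨_, rfl⟩ | ⟨_, rfl⟩ | ⟨_, rfl⟩ <;> simp
  have hu : isBruhDrop (List.replicate nr 'r' ++ (List.replicate nu 'u' ++ List.replicate nh 'h')) 'r'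
      = List.replicate nu 'u' ++ List.replicate nh 'h' := by
    unfold isBruhDrop
    rw [dropWhile_replicate_append _ _ (by simp)]
    apply dropWhile_eq_self_of
    intro x hx
    simp only [List.mem_append, List.mem_replicate] at hx
    rcases hx with ⟨_, rfl⟩ | ⟨_, rfl⟩ <;> simp
  have hdu : isBruhDrop (List.replicate nu 'u' ++ List.replicate nh 'h') 'u' = List.replicate nh 'h' := by
    unfold isBruhDrop
    rw [dropWhile_replicate_append _ _ (by simp)]
    apply dropWhile_eq_self_of
    intro x hx
    simp only [List.mem_replicate] at hx
    rcases hx with ⟨_, rfl⟩; simp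
  have hrest : isBruhDrop (List.replicate nh 'h') 'h' = [] := by
    unfold isBruhDrop
    have := dropWhile_replicate_append (· == 'h') 'h' (by simp) nh []
    simp only [List.append_nil, List.dropWhile_nil] at this
    exact this
  unfold Bcore
  rw [ht, hu, hdu, hrest]
  simp only [Bool.and_eq_true, decide_eq_true_eq]
  refine ⟨⟨?_, ?_⟩, trivial⟩ <;> simp <;> omega

theorem Bcore_iff (l : List Char) : Bcore l = true ↔ BruhShape l :=
  ⟨B_shape l, shape_B l⟩

-- ===== VERDICT (by name: the statement is the Claim_ definition above) =====
theorem is_bruh_spec : Claim_equal_is_bruh := by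
  intro m _
  unfold Spec_is_bruh
  rw [is_bruh_eq_Acore, is_bruh_alt_eq_Bcore]
  set l := (PySem.Str.lower m).toList.filter (fun c => PySem.Chars.isalnum c)
  have hiff := (Acore_iff l).trans (Bcore_iff l).symm
  rcases hA : Acore l with _ | _ <;> rcases hB : Bcore l with _ | _ <;> simp_all
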